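-- pv_equiv track=rewrite | github.com/charles-wangkai/hacker.org | challenge/DidacticFeedbackCipherLong2.py | decrypt_feedback_cipher_long
-- ===== SOURCE A (Python) =====
-- import string
--
-- ALPHABET = string.ascii_letters + ' ,.`'
--
-- def decrypt_feedback_cipher_long(cipher, key, x):
--     s = bytes.fromhex(cipher)
--
--     plain = ''
--     for i in range(0, len(s), 4):
--         s_part = s[i:i + 4]
--         part = int.from_bytes(s_part, byteorder='little')
--         c = key ^ part
--
--         decrypted = ''.join(map(chr, c.to_bytes(4, byteorder='little')))[:len(s_part)]
--         for ch in decrypted: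
--             if ch not in ALPHABET:
--                 return None
--
--         plain += decrypted
--
--         key = (part + x) % 0x100000000
--     return plain
-- ===== SOURCE B (Python) =====
-- import string
--
-- ALPHABET = string.ascii_letters + ' ,.`'
--
-- def decrypt_feedback_cipher_long(cipher, key, x):
--     s = bytes.fromhex(cipher)
--     n = len(s)
--
--     # assemble the whole keystream as ONE big integer: block i's key sits at bit 8*i,
--     # masked to the block's width (the key chain depends only on the ciphertext)
--     keystream = 0
--     k = key
--     for i in range(0, n, 4):
--         width = min(4, n - i)
--         keystream += (k & ((1 << (8 * width)) - 1)) << (8 * i)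
--         k = (int.from_bytes(s[i:i + 4], byteorder='little') + x) % 0x100000000
--
--     # decrypt the whole message with a single big-integer XOR
--     plain = (int.from_bytes(s, byteorder='little') ^ keystream).to_bytes(n, byteorder='little').decode('latin-1')
--
--     return plain if all(ch in ALPHABET for ch in plain) else None
-- ===== Notes on version B (the rewrite author's own statement) =====
-- stated objective: alternative
-- what changed: A decrypts block by block with int.to_bytes and validates each block inside the loop with an early return; B assembles the entire keystream as one big integer (each block key masked and shifted to its bit position), decrypts the whole message with a single big-integer XOR and one to_bytes/decode, and validates the finished plaintext afterwards.
import Mathlib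
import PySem

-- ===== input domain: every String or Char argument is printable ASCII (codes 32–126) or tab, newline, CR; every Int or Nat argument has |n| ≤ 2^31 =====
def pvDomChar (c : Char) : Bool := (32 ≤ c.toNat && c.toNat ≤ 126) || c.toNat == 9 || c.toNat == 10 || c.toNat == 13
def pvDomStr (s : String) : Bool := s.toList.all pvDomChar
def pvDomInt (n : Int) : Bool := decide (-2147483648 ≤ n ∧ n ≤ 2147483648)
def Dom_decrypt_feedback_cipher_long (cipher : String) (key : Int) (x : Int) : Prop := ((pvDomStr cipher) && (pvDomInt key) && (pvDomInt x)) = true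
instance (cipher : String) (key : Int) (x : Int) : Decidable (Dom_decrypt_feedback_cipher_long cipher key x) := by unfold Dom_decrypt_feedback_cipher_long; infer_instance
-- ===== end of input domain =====

-- B replaces A's per-block decrypt-and-validate loop by a different data representation:
-- it assembles the whole keystream as ONE big integer, decrypts the whole message with a
-- single big-integer XOR, and validates the finished plaintext afterwards.  Equivalence of
-- RETURN values on Pre_; no speed claim.

-- shared helper: 0-9/a-f/A-F test (the digits bytes.fromhex accepts)
def pvIsHexDigit (c : Char) : Bool :=
  (48 ≤ c.toNat && c.toNat ≤ 57) || (97 ≤ c.toNat && c.toNat ≤ 102) || (65 ≤ c.toNat && c.toNat ≤ 70)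

def pvHexVal (c : Char) : Nat :=
  if 48 ≤ c.toNat ∧ c.toNat ≤ 57 then c.toNat - 48
  else if 97 ≤ c.toNat ∧ c.toNat ≤ 102 then c.toNat - 87
  else if 65 ≤ c.toNat ∧ c.toNat ≤ 70 then c.toNat - 55
  else 0

-- ASCII whitespace bytes.fromhex skips between byte pairs (those representable in Dom)
def pvIsSpace (c : Char) : Bool := c.toNat == 32 || c.toNat == 9 || c.toNat == 10 || c.toNat == 13

-- shared helper: bytes.fromhex — whitespace allowed between byte pairs, never inside one
def pvFromHex? : List Char → Option (List Nat)
  | [] => some []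
  | [a] => if pvIsSpace a then some [] else none
  | a :: b :: rest =>
      if pvIsSpace a then pvFromHex? (b :: rest)
      else if pvIsHexDigit a && pvIsHexDigit b then
        (pvFromHex? rest).map (fun t => (16 * pvHexVal a + pvHexVal b) :: t)
      else none

-- shared helper: int.from_bytes(_, byteorder='little')
def pvLE (b : List Nat) : Int := b.foldr (fun d acc => (d : Int) + 256 * acc) 0

def pvALPHABET : List Char :=
  "abcdefghijklmnopqrstuvwxyzABCDEFGHIJKLMNOPQRSTUVWXYZ ,.`".toList

-- ===== PORT A =====
-- A's loop: per 4-byte block, c = key ^ part, c.to_bytes(4,'little') (raises unless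
-- 0 ≤ c < 2^32, ported as `none`), truncate, validate each char immediately (early None),
-- append to plain, chain key = (part + x) % 2^32.
-- (A's locals s_part / part / c / decrypted are inlined below: same values, step for step)
def pvLoopA : List Nat → Int → Int → List Char → Option (List Char)
  | [], _, _, plain => some plain
  | b0 :: rest, key, x, plain =>
      if 0 ≤ PySem.Int.bxor key (pvLE ((b0 :: rest).take 4)) ∧
         PySem.Int.bxor key (pvLE ((b0 :: rest).take 4)) < 4294967296 then
        if (((List.range 4).map (fun j =>
              Char.ofNat (((PySem.Int.bxor key (pvLE ((b0 :: rest).take 4))).toNat >>> (8 * j)) % 256))).take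
                ((b0 :: rest).take 4).length).all (fun ch => pvALPHABET.contains ch) then
          pvLoopA ((b0 :: rest).drop 4)
            (PySem.Int.mod (pvLE ((b0 :: rest).take 4) + x) 4294967296) x
            (plain ++ (((List.range 4).map (fun j =>
              Char.ofNat (((PySem.Int.bxor key (pvLE ((b0 :: rest).take 4))).toNat >>> (8 * j)) % 256))).take
                ((b0 :: rest).take 4).length))
        else none
      else none
termination_by s => s.length
decreasing_by simp

def decrypt_feedback_cipher_long (cipher : String) (key : Int) (x : Int) : Option String :=
  match pvFromHex? cipher.toList with
  | none => none        -- ValueError from bytes.fromhex: excluded by Pre_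
  | some s => (pvLoopA s key x []).map String.mk

-- ===== PORT B =====
-- B's keystream loop: keystream += (k & ((1 << 8*width) - 1)) << 8*i, with width = min(4, n-i)
-- the remaining length; the running sum becomes a structural recursion carrying the offset i.
def pvKsLoop : List Nat → Int → Int → Nat → Int
  | [], _, _, _ => 0
  | b0 :: rest, k, x, i =>
      (PySem.Int.band k ((1 <<< (8 * min 4 (b0 :: rest).length)) - 1)) <<< (8 * i)
      + pvKsLoop ((b0 :: rest).drop 4) (PySem.Int.mod (pvLE ((b0 :: rest).take 4) + x) 4294967296) x (i + 4)
termination_by s => s.length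
decreasing_by simp

def decrypt_feedback_cipher_long_alt (cipher : String) (key : Int) (x : Int) : Option String :=
  match pvFromHex? cipher.toList with
  | none => none        -- same ValueError from bytes.fromhex
  | some s =>
      let ks := pvKsLoop s key x 0
      -- (S ^ keystream).to_bytes(n,'little').decode('latin-1'): the XOR is always in
      -- [0, 2^(8n)) since both operands are, so to_bytes never raises; ported as byte
      -- extraction from the Nat value (exact)
      let plain := (List.range s.length).map (fun j =>
        Char.ofNat (((PySem.Int.bxor (pvLE s) ks).toNat >>> (8 * j)) % 256))
      if plain.all (fun ch => pvALPHABET.contains ch) then some (String.mk plain) else none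

-- ===== PRECONDITION & SPEC =====
-- Pre_ excludes exactly where A raises: (a) ciphers on which bytes.fromhex raises
-- ValueError (some whitespace-separated token is not even-length hex); (b) negative key
-- with at least one byte of input, where A's c.to_bytes raises OverflowError.
def Pre_decrypt_feedback_cipher_long (cipher : String) (key : Int) (x : Int) : Prop :=
  (∀ t ∈ cipher.toList.splitOnP pvIsSpace, t.all pvIsHexDigit = true ∧ t.length % 2 = 0) ∧
  (0 ≤ key ∨ cipher.toList.all pvIsSpace = true)
instance (cipher : String) (key : Int) (x : Int) : Decidable (Pre_decrypt_feedback_cipher_long cipher key x) := by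
  unfold Pre_decrypt_feedback_cipher_long; infer_instance

def pvWitness_decrypt_feedback_cipher_long : String × Int × Int := ("41424344", 0, 0)

def Spec_decrypt_feedback_cipher_long (cipher : String) (key : Int) (x : Int) (out : Option String) : Prop := out = decrypt_feedback_cipher_long_alt cipher key x
instance (cipher : String) (key : Int) (x : Int) (out : Option String) : Decidable (Spec_decrypt_feedback_cipher_long cipher key x out) := by unfold Spec_decrypt_feedback_cipher_long; infer_instance

-- ===== CLAIM (what is proved, stated in full; the proofs are below) =====
def Claim_equal_decrypt_feedback_cipher_long : Prop := ∀ (cipher : String) (key : Int) (x : Int), Dom_decrypt_feedback_cipher_long cipher key x → Pre_decrypt_feedback_cipher_long cipher key x → Spec_decrypt_feedback_cipher_long cipher key x (decrypt_feedback_cipher_long cipher key x)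


-- ===== LEMMAS AND PROOFS =====

-- the hex parser only produces bytes < 256
lemma pvFromHex?_lt : ∀ (l : List Char) (s : List Nat), pvFromHex? l = some s → ∀ b ∈ s, b < 256 := by
  intro l
  induction l using pvFromHex?.induct with
  | case1 =>
      intro s hs
      simp only [pvFromHex?, Option.some_inj] at hs
      simp [← hs]
  | case2 a ha =>
      intro s hs
      simp only [pvFromHex?, ha, if_true, Option.some_inj] at hs
      simp [← hs]
  | case3 a ha =>
      intro s hs
      simp [pvFromHex?, ha] at hs
  | case4 a b rest ha ih =>
      intro s hs
      simp only [pvFromHex?, ha, if_true] at hs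
      exact ih s hs
  | case5 a b rest ha hab ih =>
      intro s hs
      simp only [pvFromHex?, ha, hab, if_true, Bool.false_eq_true, if_false] at hs
      obtain ⟨t, ht, hcons⟩ := Option.map_eq_some_iff.mp hs
      intro v hv
      rw [← hcons] at hv
      rcases List.mem_cons.mp hv with h | h
      · subst h
        unfold pvHexVal
        split_ifs <;> omega
      · exact ih t ht v h
  | case6 a b rest ha hab =>
      intro s hs
      simp only [pvFromHex?, ha, hab, Bool.false_eq_true, if_false] at hs
      exact absurd hs (by simp)

-- an all-whitespace cipher parses to no bytes at all
lemma pvFromHex?_of_all_space : ∀ (l : List Char), l.all pvIsSpace = true → pvFromHex? l = some [] := by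
  intro l
  induction l using pvFromHex?.induct with
  | case1 => intro _; rfl
  | case2 a ha => intro _; simp [pvFromHex?, ha]
  | case3 a ha => intro h; simp at h; simp [h] at ha
  | case4 a b rest ha ih =>
      intro h
      simp only [List.all_cons, Bool.and_eq_true] at h
      simp only [pvFromHex?, ha, if_true]
      exact ih (by simp [h.2])
  | case5 a b rest ha hab ih =>
      intro h
      simp only [List.all_cons, Bool.and_eq_true] at h
      simp [h.1] at ha
  | case6 a b rest ha hab =>
      intro h
      simp only [List.all_cons, Bool.and_eq_true] at h
      simp [h.1] at ha

lemma pvLE_cons (d : Nat) (t : List Nat) : pvLE (d :: t) = (d : Int) + 256 * pvLE t := rfl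

lemma pvLE_nonneg (b : List Nat) : 0 ≤ pvLE b := by
  induction b with
  | nil => simp [pvLE]
  | cons d t ih => rw [pvLE_cons]; positivity

lemma pvLE_lt (b : List Nat) (hlt : ∀ v ∈ b, v < 256) : pvLE b < 2 ^ (8 * b.length) := by
  induction b with
  | nil => simp [pvLE]
  | cons d t ih =>
      have hd := hlt d (by simp)
      have ht := ih (fun v hv => hlt v (by simp [hv]))
      rw [pvLE_cons]
      have : (8 : Nat) * (d :: t).length = 8 * t.length + 8 := by simp; ring
      rw [this, pow_add]
      push_cast
      nlinarith [pvLE_nonneg t]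

lemma pvLE_toNat_cons (d : Nat) (t : List Nat) :
    (pvLE (d :: t)).toNat = d + 256 * (pvLE t).toNat := by
  have := pvLE_nonneg t
  rw [pvLE_cons]
  omega

-- byte i of a little-endian value is the i-th byte of its list (0 past the end)
lemma pvLE_byte (b : List Nat) (hlt : ∀ v ∈ b, v < 256) (i : Nat) :
    ((pvLE b).toNat >>> (8 * i)) % 256 = b.getD i 0 := by
  induction b generalizing i with
  | nil => simp [pvLE]
  | cons d t ih =>
      have hd := hlt d (by simp)
      rw [pvLE_toNat_cons]
      cases i with
      | zero => simp [Nat.shiftRight_eq_div_pow]; omega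
      | succ i =>
          have h8 : 8 * (i + 1) = 8 + 8 * i := by ring
          rw [h8, Nat.shiftRight_add]
          have hdiv : (d + 256 * (pvLE t).toNat) >>> 8 = (pvLE t).toNat := by
            rw [Nat.shiftRight_eq_div_pow]; omega
          rw [hdiv, ih (fun v hv => hlt v (by simp [hv]))]
          simp [List.getD]

-- pvLE of an append splits at the byte boundary
lemma pvLE_append (a b : List Nat) :
    pvLE (a ++ b) = pvLE a + 2 ^ (8 * a.length) * pvLE b := by
  induction a with
  | nil => simp [pvLE]
  | cons d t ih =>
      rw [List.cons_append, pvLE_cons, ih, pvLE_cons]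
      have : (8 : Nat) * (d :: t).length = 8 * t.length + 8 := by simp; ring
      rw [this, pow_add]
      push_cast
      ring

-- Python's (k & ((1 << w) - 1)) for nonnegative k
lemma band_mask (k : Int) (hk : 0 ≤ k) (w : Nat) :
    PySem.Int.band k ((1 <<< w) - 1) = ((k.toNat % 2 ^ w : Nat) : Int) := by
  have h1 : ((1 <<< w : Nat) : Int) - 1 = ((2 ^ w - 1 : Nat) : Int) := by
    rw [Nat.one_shiftLeft]
    have : (1 : Nat) ≤ 2 ^ w := Nat.one_le_two_pow
    push_cast [this]
    ring
  have hk' : k = ((k.toNat : Nat) : Int) := by omega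
  rw [h1, hk', PySem.Int.band_natCast, Nat.and_two_pow_sub_one_eq_mod]
  simp

-- the little-endian byte list of m truncated to l ≤ 4 bytes
lemma pvLE_range_bytes (m : Nat) (l : Nat) (hl : l ≤ 4) :
    pvLE ((List.range l).map (fun j => (m >>> (8 * j)) % 256)) = ((m % 2 ^ (8 * l) : Nat) : Int) := by
  interval_cases l <;>
    simp [List.range_succ, pvLE, Nat.shiftRight_eq_div_pow] <;> push_cast <;> omega

-- keystream byte list: the key bytes of each block, chained like A chains its key
def pvKB : List Nat → Int → Int → List Nat
  | [], _, _ => []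
  | b0 :: rest, k, x =>
      (List.range (min 4 (b0 :: rest).length)).map (fun j => (k.toNat >>> (8 * j)) % 256)
      ++ pvKB ((b0 :: rest).drop 4) (PySem.Int.mod (pvLE ((b0 :: rest).take 4) + x) 4294967296) x
termination_by s => s.length
decreasing_by simp

lemma pvKB_lt : ∀ (s : List Nat) (k x : Int), ∀ v ∈ pvKB s k x, v < 256 := by
  intro s k x
  fun_induction pvKB s k x with
  | case1 => simp
  | case2 b0 rest k x ih =>
      intro v hv
      rcases List.mem_append.mp hv with h | h
      · obtain ⟨j, _, hj⟩ := List.mem_map.mp h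
        omega
      · exact ih v h

lemma pymod_bounds (a m : Int) (h : 0 < m) : 0 ≤ PySem.Int.mod a m ∧ PySem.Int.mod a m < m := by
  rw [PySem.Int.mod_eq_emod_of_pos h]
  exact ⟨Int.emod_nonneg a (by omega), Int.emod_lt_of_pos a h⟩

-- the big-integer keystream IS the little-endian value of the keystream byte list
lemma pvKsLoop_eq : ∀ (s : List Nat) (k x : Int) (i : Nat), 0 ≤ k →
    pvKsLoop s k x i = pvLE (pvKB s k x) * 2 ^ (8 * i) := by
  intro s k x i hk
  fun_induction pvKsLoop s k x i with
  | case1 => simp [pvKB, pvLE]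
  | case2 b0 rest k x i ih =>
      have hk' := (pymod_bounds (pvLE ((b0 :: rest).take 4) + x) 4294967296 (by norm_num)).1
      rw [ih hk']
      rw [pvKB, pvLE_append]
      have hlen : ((List.range (min 4 (b0 :: rest).length)).map
          (fun j => (k.toNat >>> (8 * j)) % 256)).length = min 4 (b0 :: rest).length := by simp
      rw [hlen, pvLE_range_bytes k.toNat (min 4 (b0 :: rest).length) (by omega),
          band_mask k hk]
      rw [Int.shiftLeft_eq]
      by_cases h4 : 4 ≤ (b0 :: rest).length
      · have hmin : min 4 (b0 :: rest).length = 4 := by omega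
        rw [hmin]
        have : 8 * (i + 4) = 8 * 4 + 8 * i := by ring
        rw [this, pow_add]
        ring
      · have hdrop : (b0 :: rest).drop 4 = [] := by
          apply List.drop_eq_nil_of_le; omega
        rw [hdrop]
        simp [pvKB, pvLE]

-- byte j of a XOR = XOR of the bytes (Nat)
lemma byte_xor (k p j : Nat) :
    ((k ^^^ p) >>> (8 * j)) % 256 = ((k >>> (8 * j)) % 256) ^^^ ((p >>> (8 * j)) % 256) := by
  have h255 : ∀ a : Nat, a % 256 = a &&& 255 := by
    intro a
    have := Nat.and_two_pow_sub_one_eq_mod a 8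
    norm_num at this
    omega
  rw [h255, h255, h255, Nat.shiftRight_xor_distrib, Nat.and_xor_distrib_right]

-- c = key ^ part stays in [0, 2^32) when key and part do
lemma bxor_bounds (key p : Int) (hk0 : 0 ≤ key) (hk1 : key < 4294967296)
    (hp0 : 0 ≤ p) (hp1 : p < 4294967296) :
    0 ≤ PySem.Int.bxor key p ∧ PySem.Int.bxor key p < 4294967296 := by
  have hkey : key = ((key.toNat : Nat) : Int) := by omega
  have hpp : p = ((p.toNat : Nat) : Int) := by omega
  rw [hkey, hpp, PySem.Int.bxor_natCast]
  have : key.toNat ^^^ p.toNat < 4294967296 := by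
    have h32 : (4294967296 : Nat) = 2 ^ 32 := by norm_num
    rw [h32]
    exact Nat.xor_lt_two_pow (by omega) (by omega)
  constructor
  · positivity
  · exact_mod_cast this

-- the plaintext both programs compute, byte-wise: s[j] XOR keystream-byte[j]
def pvT (s : List Nat) (key x : Int) : List Char :=
  (List.range s.length).map (fun j => Char.ofNat (s.getD j 0 ^^^ (pvKB s key x).getD j 0))

-- pvT splits at the first block boundary
lemma pvT_split (b0 : Nat) (rest : List Nat) (key x : Int) :
    pvT (b0 :: rest) key x =
      (List.range (min 4 (b0 :: rest).length)).map
        (fun j => Char.ofNat ((b0 :: rest).getD j 0 ^^^ ((key.toNat >>> (8 * j)) % 256)))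
      ++ pvT ((b0 :: rest).drop 4)
           (PySem.Int.mod (pvLE ((b0 :: rest).take 4) + x) 4294967296) x := by
  set s := b0 :: rest with hs
  set l := min 4 s.length with hl
  set k' := PySem.Int.mod (pvLE (s.take 4) + x) 4294967296 with hk'
  have hlen : s.length = l + (s.length - 4) := by
    have : 1 ≤ s.length := by simp [hs]
    omega
  have hr : List.range s.length = List.range l ++ (List.range (s.length - 4)).map (l + ·) := by
    conv_lhs => rw [hlen]
    rw [List.range_add]
  unfold pvT
  rw [hr, List.map_append, List.map_map, pvKB, List.length_drop]
  congr 1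
  · -- the first l characters
    apply List.map_congr_left
    intro j hj
    have hj' : j < l := List.mem_range.mp hj
    congr 1
    have hj2 : j < min 4 (rest.length + 1) := by
      have h3 := hj'
      rw [hl, hs, List.length_cons] at h3
      exact h3
    rw [List.getD_append]
    · simp [List.getD, List.getElem?_range, hj2]
    · simp only [List.length_map, List.length_range]
      exact hj2
  · -- the rest, shifted by l
    apply List.map_congr_left
    intro j hj
    have hj' : j < s.length - 4 := List.mem_range.mp hj
    have hl4 : l = 4 := by omega
    simp only [Function.comp]
    congr 1
    have h1 : s.getD (l + j) 0 = (s.drop 4).getD j 0 := by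
      simp [List.getD, hl4, List.getElem?_drop]
    have h2 : ((List.range l).map (fun j => (key.toNat >>> (8 * j)) % 256)
          ++ pvKB (s.drop 4) k' x).getD (l + j) 0 = (pvKB (s.drop 4) k' x).getD j 0 := by
      have hlm : ((List.range l).map (fun j => (key.toNat >>> (8 * j)) % 256)).length = l := by simp
      rw [show l + j = ((List.range l).map (fun j => (key.toNat >>> (8 * j)) % 256)).length + j by rw [hlm]]
      simp [List.getD, List.getElem?_append_right]
    rw [h1, h2]

-- A's per-block decrypted characters are exactly the corresponding slice of pvT
lemma block_chars_eq (key : Int) (b0 : Nat) (rest : List Nat) (hk : 0 ≤ key)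
    (hlt : ∀ v ∈ b0 :: rest, v < 256) :
    (((List.range 4).map (fun j =>
        Char.ofNat (((PySem.Int.bxor key (pvLE ((b0 :: rest).take 4))).toNat >>> (8 * j)) % 256))).take
          ((b0 :: rest).take 4).length)
    = (List.range (min 4 (b0 :: rest).length)).map
        (fun j => Char.ofNat ((b0 :: rest).getD j 0 ^^^ ((key.toNat >>> (8 * j)) % 256))) := by
  have hbt : ∀ v ∈ (b0 :: rest).take 4, v < 256 := fun v hv => hlt v (List.mem_of_mem_take hv)
  have hp : 0 ≤ pvLE ((b0 :: rest).take 4) := pvLE_nonneg _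
  rw [← List.map_take, List.take_range]
  have hmin : min ((b0 :: rest).take 4).length 4 = min 4 (b0 :: rest).length := by simp; omega
  rw [hmin]
  apply List.map_congr_left
  intro j hj
  have hj' : j < min 4 (b0 :: rest).length := List.mem_range.mp hj
  congr 1
  have hkey : key = ((key.toNat : Nat) : Int) := by omega
  have hpp : pvLE ((b0 :: rest).take 4) = (((pvLE ((b0 :: rest).take 4)).toNat : Nat) : Int) := by omega
  rw [hkey, hpp, PySem.Int.bxor_natCast]
  simp only [Int.toNat_natCast]
  rw [byte_xor, pvLE_byte ((b0 :: rest).take 4) hbt j]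
  have : ((b0 :: rest).take 4).getD j 0 = (b0 :: rest).getD j 0 := by
    simp only [List.getD, List.getElem?_take]
    simp [show j < 4 by omega]
  rw [this, Nat.xor_comm]

-- main loop lemma: A's interleaved loop = "decrypt all (pvT), validate after"
lemma loopA_eq : ∀ (s : List Nat) (key x : Int) (plain : List Char),
    (∀ v ∈ s, v < 256) → 0 ≤ key → key < 4294967296 →
    pvLoopA s key x plain =
      (if (pvT s key x).all (fun ch => pvALPHABET.contains ch)
       then some (plain ++ pvT s key x)
       else none) := by
  intro s key x plain
  fun_induction pvLoopA s key x plain with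
  | case1 key x plain =>
      intro _ _ _
      simp [pvT]
  | case2 b0 rest key x plain hc hall ih =>
      intro hb hk0 hk1
      have hkey' := pymod_bounds (pvLE ((b0 :: rest).take 4) + x) 4294967296 (by norm_num)
      have hbd : ∀ v ∈ (b0 :: rest).drop 4, v < 256 := fun v hv => hb v (List.mem_of_mem_drop hv)
      rw [ih hbd hkey'.1 hkey'.2]
      rw [pvT_split, ← block_chars_eq key b0 rest hk0 hb]
      simp only [List.all_append, hall, Bool.true_and, List.append_assoc]
  | case3 b0 rest key x plain hc hall =>
      intro hb hk0 hk1
      simp only [Bool.not_eq_true] at hall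
      rw [pvT_split, ← block_chars_eq key b0 rest hk0 hb]
      simp only [List.all_append, hall, Bool.false_and]
      rfl
  | case4 b0 rest key x plain hc =>
      intro hb hk0 hk1
      exfalso
      have hbt : ∀ v ∈ (b0 :: rest).take 4, v < 256 := fun v hv => hb v (List.mem_of_mem_take hv)
      have hlen4 : ((b0 :: rest).take 4).length ≤ 4 := by simp
      have hpart : pvLE ((b0 :: rest).take 4) < 4294967296 := by
        have := pvLE_lt ((b0 :: rest).take 4) hbt
        have h2 : (2 : Int) ^ (8 * ((b0 :: rest).take 4).length) ≤ 2 ^ 32 := by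
          apply pow_le_pow_right₀ (by norm_num); omega
        calc pvLE ((b0 :: rest).take 4) < 2 ^ (8 * ((b0 :: rest).take 4).length) := this
          _ ≤ 2 ^ 32 := h2
          _ = 4294967296 := by norm_num
      exact hc (bxor_bounds key _ hk0 hk1 (pvLE_nonneg _) hpart)

-- B's plaintext characters equal pvT (byte extraction from the big XOR)
lemma altChars_eq (s : List Nat) (key x : Int) (hb : ∀ v ∈ s, v < 256) (hk : 0 ≤ key) :
    (List.range s.length).map (fun j =>
        Char.ofNat (((PySem.Int.bxor (pvLE s) (pvKsLoop s key x 0)).toNat >>> (8 * j)) % 256))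
    = pvT s key x := by
  have hks : pvKsLoop s key x 0 = pvLE (pvKB s key x) := by
    rw [pvKsLoop_eq s key x 0 hk]; simp
  unfold pvT
  apply List.map_congr_left
  intro j hj
  congr 1
  rw [hks]
  have hS : pvLE s = (((pvLE s).toNat : Nat) : Int) := by have := pvLE_nonneg s; omega
  have hK : pvLE (pvKB s key x) = (((pvLE (pvKB s key x)).toNat : Nat) : Int) := by
    have := pvLE_nonneg (pvKB s key x); omega
  rw [hS, hK, PySem.Int.bxor_natCast]
  simp only [Int.toNat_natCast]
  rw [byte_xor, pvLE_byte s hb j, pvLE_byte (pvKB s key x) (pvKB_lt s key x) j]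

-- ===== VERDICT (by name: the statement is the Claim_ definition above) =====
theorem decrypt_feedback_cipher_long_spec : Claim_equal_decrypt_feedback_cipher_long := by
  intro cipher key x hdom hpre
  unfold Spec_decrypt_feedback_cipher_long
  rcases hpre with ⟨_, hk | hemp⟩
  · -- 0 ≤ key: key < 2^32 comes from Dom
    have hk1 : key < 4294967296 := by
      unfold Dom_decrypt_feedback_cipher_long pvDomInt at hdom
      simp only [Bool.and_eq_true, decide_eq_true_eq] at hdom
      omega
    unfold decrypt_feedback_cipher_long decrypt_feedback_cipher_long_alt
    cases h : pvFromHex? cipher.toList with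
    | none => rfl
    | some s =>
        have hb := pvFromHex?_lt cipher.toList s h
        simp only [loopA_eq s key x [] hb hk hk1, altChars_eq s key x hb hk]
        split <;> simp
  · -- all-whitespace cipher: zero bytes, both sides return the empty string
    unfold decrypt_feedback_cipher_long decrypt_feedback_cipher_long_alt
    rw [pvFromHex?_of_all_space cipher.toList hemp]
    simp [pvLoopA]
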